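-- pv_equiv track=rewrite | github.com/aitorormazabal/poetry_generation | eu/mark_rhyme_eu.py | fromVowel
-- ===== SOURCE A (Python) =====
-- vowels = 'aeiou'
--
-- def fromVowel(component):
--     lastVowel = len(component)-1
--     for i in range(len(component)):
--         if component[i] in vowels:
--             lastVowel = i
--     if lastVowel>0 and component[lastVowel-1] in vowels:
--         lastVowel -=1
--     return component[lastVowel:]
-- ===== SOURCE B (Python) =====
-- def fromVowel(component):
--     rev = component[::-1]
--     for i, c in enumerate(rev):
--         if c in 'aeiou':
--             if i + 1 < len(rev) and rev[i + 1] in 'aeiou':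
--                 i += 1
--             return rev[:i + 1][::-1]
--     return component[-1:]
-- ===== Notes on version B (the rewrite author's own statement) =====
-- stated objective: simpler
-- what changed: B reverses the string once and scans it for the first vowel (the input's last vowel), returning early with the matching prefix of the reversed string re-reversed, instead of A's full forward loop over all indices that keeps overwriting a last-vowel index.
import Mathlib
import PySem

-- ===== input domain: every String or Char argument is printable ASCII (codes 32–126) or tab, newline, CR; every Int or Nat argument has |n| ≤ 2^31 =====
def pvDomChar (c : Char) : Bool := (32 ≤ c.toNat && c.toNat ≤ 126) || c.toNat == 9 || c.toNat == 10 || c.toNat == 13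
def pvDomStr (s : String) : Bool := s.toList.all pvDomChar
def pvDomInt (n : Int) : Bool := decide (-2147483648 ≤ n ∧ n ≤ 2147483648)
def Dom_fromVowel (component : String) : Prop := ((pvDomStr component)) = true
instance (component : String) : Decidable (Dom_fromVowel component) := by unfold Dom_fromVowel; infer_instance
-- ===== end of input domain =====

-- B scans the reversed string for the first vowel (the last vowel of the input) and returns
-- that slice directly, instead of A's forward loop over all indices; objective: simpler/idiomatic.

-- the module constant `vowels = 'aeiou'` (a char is `in vowels` iff it is a member of this list;
-- exact for the 1-character strings component[i])
def pvVowels : List Char := "aeiou".toList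

-- ===== PORT A =====
def fromVowel (component : String) : String :=
  let cs := component.toList
  -- lastVowel = len(component)-1; for i in range(len(component)): if component[i] in vowels: lastVowel = i
  let lv : Int :=
    (PySem.List.pyRange 0 (cs.length : Int) 1).foldl
      (fun acc i => if PySem.List.pyGetD cs i ' ' ∈ pvVowels then i else acc)
      ((cs.length : Int) - 1)
  -- if lastVowel>0 and component[lastVowel-1] in vowels: lastVowel -= 1
  let lv : Int :=
    if lv > 0 ∧ PySem.List.pyGetD cs (lv - 1) ' ' ∈ pvVowels then lv - 1 else lv
  -- return component[lastVowel:]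
  String.ofList (PySem.List.slice cs (some lv) none)

-- ===== PORT B =====
-- the enumerate loop with early return: i is the running index into rev, full is rev itself
def pvScan (l : List Char) (i : Nat) (full : List Char) : Option (List Char) :=
  match l with
  | [] => none
  | c :: rest =>
    if c ∈ pvVowels then
      -- if i + 1 < len(rev) and rev[i+1] in 'aeiou': i += 1
      let i' := if i + 1 < full.length ∧ PySem.List.pyGetD full ((i : Int) + 1) ' ' ∈ pvVowels
                then i + 1 else i
      -- return rev[:i+1][::-1]
      some ((full.take (i' + 1)).reverse)
    else pvScan rest (i + 1) full

def fromVowel_alt (component : String) : String :=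
  let rev := component.toList.reverse   -- component[::-1] (PySem.List.slice?_none_none_neg_one)
  match pvScan rev 0 rev with
  | some suf => String.ofList suf
  | none => String.ofList (PySem.List.slice component.toList (some (-1)) none)  -- component[-1:]

-- ===== PRECONDITION & SPEC =====
def Spec_fromVowel (component : String) (out : String) : Prop := out = fromVowel_alt component
instance (component : String) (out : String) : Decidable (Spec_fromVowel component out) := by unfold Spec_fromVowel; infer_instance

-- ===== CLAIM (what is proved, stated in full; the proofs are below) =====
def Claim_equal_fromVowel : Prop := ∀ (component : String), Dom_fromVowel component → Spec_fromVowel component (fromVowel component)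

-- ===== LEMMAS AND PROOFS =====

-- characterization of A's forward fold: it returns the index of the LAST vowel of cs
-- (= length - 1 - (index of the first vowel of cs.reverse)), or length - 1 if there is none
theorem pv_foldA (cs : List Char) (init : Int) :
    (PySem.List.pyRange 0 (cs.length : Int) 1).foldl
      (fun acc i => if PySem.List.pyGetD cs i ' ' ∈ pvVowels then i else acc)
      init
    = match cs.reverse.findIdx? (fun c => decide (c ∈ pvVowels)) with
      | some j => (cs.length : Int) - 1 - j
      | none => init := by
  induction cs using List.reverseRecOn generalizing init with
  | nil => simp [PySem.List.pyRange]
  | append_singleton ds c ih =>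
    have hlen : (((ds ++ [c]).length : Nat) : Int) = (ds.length : Int) + 1 := by
      simp
    rw [hlen, PySem.List.pyRange_one_succ_right (by positivity), List.foldl_append]
    have hcongr :
        (PySem.List.pyRange 0 (ds.length : Int) 1).foldl
          (fun acc i => if PySem.List.pyGetD (ds ++ [c]) i ' ' ∈ pvVowels then i else acc) init
        = (PySem.List.pyRange 0 (ds.length : Int) 1).foldl
          (fun acc i => if PySem.List.pyGetD ds i ' ' ∈ pvVowels then i else acc) init := by
      apply PySem.List.foldl_congr_mem
      intro acc x hx
      rcases PySem.List.mem_pyRange_one.mp hx with ⟨hx0, hx1⟩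
      rw [PySem.List.pyGetD_eq_getElem _ _ hx0 (by simp; omega),
          PySem.List.pyGetD_eq_getElem _ _ hx0 (by omega)]
      rw [List.getElem_append_left (by omega)]
    rw [hcongr, ih]
    have hc : PySem.List.pyGetD (ds ++ [c]) ((ds.length : Nat) : Int) ' ' = c := by
      rw [PySem.List.pyGetD_eq_getElem _ _ (by positivity) (by simp)]
      simp
    have hrev : (ds ++ [c]).reverse = c :: ds.reverse := by simp
    rw [hrev, List.findIdx?_cons]
    by_cases hv : c ∈ pvVowels
    · simp [hc, hv]
    · simp only [hv, decide_false, Bool.false_eq_true, if_false]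
      cases hfi : ds.reverse.findIdx? (fun c => decide (c ∈ pvVowels)) with
      | none => simp [hc, hv]
      | some j =>
        simp only [Option.map_some, List.foldl_cons, List.foldl_nil, hc, hv, if_false]
        push_cast
        ring

theorem pv_foldA_none (cs : List Char) (init : Int)
    (h : cs.reverse.findIdx? (fun c => decide (c ∈ pvVowels)) = none) :
    (PySem.List.pyRange 0 (cs.length : Int) 1).foldl
      (fun acc i => if PySem.List.pyGetD cs i ' ' ∈ pvVowels then i else acc) init = init := by
  rw [pv_foldA, h]

theorem pv_foldA_some (cs : List Char) (init : Int) (j : Nat)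
    (h : cs.reverse.findIdx? (fun c => decide (c ∈ pvVowels)) = some j) :
    (PySem.List.pyRange 0 (cs.length : Int) 1).foldl
      (fun acc i => if PySem.List.pyGetD cs i ' ' ∈ pvVowels then i else acc) init
    = (cs.length : Int) - 1 - j := by
  rw [pv_foldA, h]

-- characterization of B's scan loop
theorem pv_scan_none (l : List Char) (i : Nat) (full : List Char)
    (h : ∀ c ∈ l, c ∉ pvVowels) : pvScan l i full = none := by
  induction l generalizing i with
  | nil => rfl
  | cons c rest ih =>
    simp only [pvScan]
    rw [if_neg (h c (by simp))]
    exact ih (i + 1) (fun x hx => h x (by simp [hx]))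

theorem pv_scan_some (l : List Char) (i : Nat) (full : List Char) (j : Nat)
    (hj : l.findIdx? (fun c => decide (c ∈ pvVowels)) = some j) :
    pvScan l i full =
      some ((full.take
        ((if i + j + 1 < full.length ∧ PySem.List.pyGetD full ((i : Int) + j + 1) ' ' ∈ pvVowels
          then i + j + 1 else i + j) + 1)).reverse) := by
  induction l generalizing i j with
  | nil => simp at hj
  | cons c rest ih =>
    rw [List.findIdx?_cons] at hj
    by_cases hv : c ∈ pvVowels
    · simp only [hv, decide_true, if_true, Option.some.injEq] at hj
      subst hj
      simp only [pvScan, if_pos hv]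
      norm_num
    · simp only [hv, decide_false, Bool.false_eq_true, if_false] at hj
      obtain ⟨j', hj', rfl⟩ := Option.map_eq_some_iff.mp hj
      simp only [pvScan, if_neg hv]
      rw [ih (i + 1) j' hj']
      have h1 : i + 1 + j' + 1 = i + (j' + 1) + 1 := by omega
      have h2 : ((i + 1 : Nat) : Int) + (j' : Int) + 1 = (i : Int) + ((j' + 1 : Nat) : Int) + 1 := by
        push_cast; ring
      have h3 : i + 1 + j' = i + (j' + 1) := by omega
      rw [h1, h2, h3]

theorem pv_main (s : String) : fromVowel s = fromVowel_alt s := by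
  simp only [fromVowel, fromVowel_alt]
  cases hfi : s.toList.reverse.findIdx? (fun c => decide (c ∈ pvVowels)) with
  | none =>
    -- no vowel anywhere: A's backup guard cannot fire, both return the final drop
    rw [pv_foldA_none _ _ hfi]
    rw [pv_scan_none _ 0 _ (by
      intro c hc
      have := List.findIdx?_eq_none_iff.mp hfi c hc
      simpa using this)]
    have hnov : ∀ c ∈ s.toList, c ∉ pvVowels := by
      intro c hc
      have := List.findIdx?_eq_none_iff.mp hfi c (List.mem_reverse.mpr hc)
      simpa using this
    have hguard : ¬ ((s.toList.length : Int) - 1 > 0 ∧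
        PySem.List.pyGetD s.toList ((s.toList.length : Int) - 1 - 1) ' ' ∈ pvVowels) := by
      rintro ⟨h1, h2⟩
      have hmem : PySem.List.pyGetD s.toList ((s.toList.length : Int) - 1 - 1) ' ' ∈ s.toList := by
        apply PySem.List.pyGetD_mem
        constructor <;> omega
      exact hnov _ hmem h2
    rw [if_neg hguard]
    rcases Nat.eq_zero_or_pos s.toList.length with h0 | hpos
    · have : s.toList = [] := List.length_eq_zero_iff.mp h0
      simp [this, PySem.List.slice]
    · rw [PySem.List.slice_from _ (by omega), PySem.List.slice_from_neg_one]
      have : ((s.toList.length : Int) - 1).toNat = s.toList.length - 1 := by omega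
      rw [this]
  | some j =>
    have hj := (List.findIdx?_eq_some_iff_findIdx_eq.mp hfi).1
    rw [List.length_reverse] at hj
    rw [pv_foldA_some _ _ _ hfi, pv_scan_some _ 0 _ j hfi]
    have hn : 0 < s.toList.length := by omega
    -- the backup guards of A and B agree
    have hGuard : ((s.toList.length : Int) - 1 - j > 0 ∧
        PySem.List.pyGetD s.toList ((s.toList.length : Int) - 1 - (j : Int) - 1) ' ' ∈ pvVowels)
        ↔ (0 + j + 1 < s.toList.reverse.length ∧
        PySem.List.pyGetD s.toList.reverse ((0 : Nat) + (j : Int) + 1) ' ' ∈ pvVowels) := by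
      rw [List.length_reverse]
      by_cases hlt : j + 1 < s.toList.length
      · have hsame : PySem.List.pyGetD s.toList ((s.toList.length : Int) - 1 - (j : Int) - 1) ' '
            = PySem.List.pyGetD s.toList.reverse ((0 : Nat) + (j : Int) + 1) ' ' := by
          rw [PySem.List.pyGetD_eq_getElem _ _ (by omega) (by omega),
              PySem.List.pyGetD_eq_getElem _ _ (by positivity)
                (by rw [List.length_reverse]; push_cast; omega)]
          rw [List.getElem_reverse]
          congr 1
          omega
        rw [hsame]
        constructor
        · rintro ⟨h1, h2⟩; exact ⟨by omega, h2⟩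
        · rintro ⟨h1, h2⟩; exact ⟨by omega, h2⟩
      · constructor
        · rintro ⟨h1, h2⟩; omega
        · rintro ⟨h1, h2⟩; omega
    by_cases hg : 0 + j + 1 < s.toList.reverse.length ∧
        PySem.List.pyGetD s.toList.reverse ((0 : Nat) + (j : Int) + 1) ' ' ∈ pvVowels
    · rw [if_pos hg, if_pos (hGuard.mpr hg)]
      have hlt : j + 1 < s.toList.length := by
        have := hg.1; rw [List.length_reverse] at this; omega
      have hA : (s.toList.length : Int) - 1 - (j : Int) - 1 = ((s.toList.length - (j + 2) : Nat) : Int) := by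
        omega
      rw [hA, PySem.List.slice_from _ (by positivity), Int.toNat_natCast]
      rw [List.reverse_take, List.reverse_reverse]
      simp only [List.length_reverse]
      have e : s.toList.length - (0 + j + 1 + 1) = s.toList.length - (j + 2) := by omega
      rw [e]
    · rw [if_neg hg, if_neg (fun h => hg (hGuard.mp h))]
      have hA : (s.toList.length : Int) - 1 - (j : Int) = ((s.toList.length - (j + 1) : Nat) : Int) := by
        omega
      rw [hA, PySem.List.slice_from _ (by positivity), Int.toNat_natCast]
      rw [List.reverse_take, List.reverse_reverse]
      simp only [List.length_reverse]
      have e : s.toList.length - (0 + j + 1) = s.toList.length - (j + 1) := by omega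
      rw [e]

-- ===== VERDICT (by name: the statement is the Claim_ definition above) =====
theorem fromVowel_spec : Claim_equal_fromVowel := by
  intro component _
  exact pv_main component
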